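-- pv_equiv track=rewrite | github.com/jykim/AI4SG | extract_journal.py | split_into_parts
-- ===== SOURCE A (Python) =====
-- def split_into_parts(content):
--     """Split content into parts using h3 headers or horizontal lines"""
--     # First, handle the first header if it exists
--     parts = []
--     current_part = []
--
--     for line in content.split('\n'):
--         if line.startswith('### '):
--             # If we have collected content, add it as a part
--             if current_part:
--                 parts.append('\n'.join(current_part).strip())
--                 current_part = []
--             # Add the header line
--             current_part.append(line)
--         elif line.strip() == '---':
--             # If we have collected content, add it as a part
--             if current_part:
--                 parts.append('\n'.join(current_part).strip())
--                 current_part = []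
--         else:
--             current_part.append(line)
--
--     # Add the last part if it exists
--     if current_part:
--         parts.append('\n'.join(current_part).strip())
--
--     # Remove empty parts
--     return [part for part in parts if part.strip()]
-- ===== SOURCE B (Python) =====
-- def split_into_parts(content):
--     """Split content into parts using h3 headers or horizontal lines (two-phase)."""
--     # Phase 1: cut the lines into groups at '---' separator lines.
--     groups = []
--     cur = []
--     for line in content.split('\n'):
--         if line.strip() == '---':
--             groups.append(cur)
--             cur = []
--         else:
--             cur.append(line)
--     groups.append(cur)
--
--     # Phase 2: within each group, emit a part at every '### ' header boundary.
--     parts = []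
--     for group in groups:
--         buf = []
--         for line in group:
--             if line.startswith('### ') and buf:
--                 parts.append('\n'.join(buf).strip())
--                 buf = []
--             buf.append(line)
--         if buf:
--             parts.append('\n'.join(buf).strip())
--     return [p for p in parts if p.strip()]
-- ===== Notes on version B (the rewrite author's own statement) =====
-- stated objective: alternative
-- what changed: Replaces A's single combined flush loop (one pass tracking parts+buffer with two flush sites) by two phases: first cut the lines into groups at '---' separator lines, then emit header-delimited parts within each group.
import Mathlib
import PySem

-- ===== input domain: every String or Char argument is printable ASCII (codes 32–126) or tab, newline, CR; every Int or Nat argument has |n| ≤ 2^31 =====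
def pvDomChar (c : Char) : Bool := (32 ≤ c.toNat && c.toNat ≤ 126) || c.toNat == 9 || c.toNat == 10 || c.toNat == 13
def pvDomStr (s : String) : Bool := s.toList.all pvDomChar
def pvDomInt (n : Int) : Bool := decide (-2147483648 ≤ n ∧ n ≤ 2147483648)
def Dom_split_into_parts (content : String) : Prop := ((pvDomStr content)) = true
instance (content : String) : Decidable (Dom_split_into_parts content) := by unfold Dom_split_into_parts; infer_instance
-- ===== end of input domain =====

-- B replaces A's single combined flush loop by two phases (cut into groups at '---'
-- lines, then emit header-delimited parts per group); objective: alternative decomposition.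

-- ===== PORT A =====
-- content.split('\n'): PySem.Str.split? with sep "\n" ≠ "" is always some, so .getD [] is exact
-- '\n'.join(cur).strip() — the flushed part (both Pythons contain this exact expression)
def pvFlushPart (cur : List String) : String := PySem.Str.strip (PySem.Str.join "\n" cur)

-- one iteration of A's loop; state = (parts, current_part)
def pvStepA (st : List String × List String) (line : String) : List String × List String :=
  if PySem.Str.startswith line "### " then
    if st.2 ≠ [] then (st.1 ++ [pvFlushPart st.2], [line]) else (st.1, st.2 ++ [line])
  else if PySem.Str.strip line == "---" then
    if st.2 ≠ [] then (st.1 ++ [pvFlushPart st.2], []) else st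
  else (st.1, st.2 ++ [line])

def split_into_parts (content : String) : List String :=
  let st := ((PySem.Str.split? content "\n").getD []).foldl pvStepA ([], [])
  let parts := if st.2 ≠ [] then st.1 ++ [pvFlushPart st.2] else st.1
  parts.filter (fun p => PySem.Str.strip p != "")

-- ===== PORT B =====
-- phase 1 step: cut into groups at '---' lines; state = (groups, cur)
def pvStepCut (st : List (List String) × List String) (line : String) :
    List (List String) × List String :=
  if PySem.Str.strip line == "---" then (st.1 ++ [st.2], []) else (st.1, st.2 ++ [line])

-- phase 2 inner step: flush at a header when the buffer is non-empty, then append the line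
def pvStepEmit (st : List String × List String) (line : String) : List String × List String :=
  if PySem.Str.startswith line "### " && !st.2.isEmpty then
    (st.1 ++ [pvFlushPart st.2], [line])
  else (st.1, st.2 ++ [line])

-- phase 2 body for one group: the inner loop plus the trailing flush
def pvEmitGroup (parts : List String) (g : List String) : List String :=
  let st := g.foldl pvStepEmit (parts, [])
  if st.2 ≠ [] then st.1 ++ [pvFlushPart st.2] else st.1

def split_into_parts_alt (content : String) : List String :=
  let c := ((PySem.Str.split? content "\n").getD []).foldl pvStepCut ([], [])
  let groups := c.1 ++ [c.2]
  (groups.foldl pvEmitGroup []).filter (fun p => PySem.Str.strip p != "")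

-- ===== PRECONDITION & SPEC =====
def Spec_split_into_parts (content : String) (out : List String) : Prop := out = split_into_parts_alt content
instance (content : String) (out : List String) : Decidable (Spec_split_into_parts content out) := by unfold Spec_split_into_parts; infer_instance

-- ===== CLAIM (what is proved, stated in full; the proofs are below) =====
def Claim_equal_split_into_parts : Prop := ∀ (content : String), Dom_split_into_parts content → Spec_split_into_parts content (split_into_parts content)

-- ===== LEMMAS AND PROOFS =====

-- the flush of a buffer, as the list of parts it contributes
def pvFlushL (cur : List String) : List String := if cur = [] then [] else [pvFlushPart cur]

-- recursive characterisation of A's loop for a given buffer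
def pvEmitA : List String → List String → List String
  | [], cur => pvFlushL cur
  | l :: ls, cur =>
    if PySem.Str.startswith l "### " then pvFlushL cur ++ pvEmitA ls [l]
    else if PySem.Str.strip l == "---" then pvFlushL cur ++ pvEmitA ls []
    else pvEmitA ls (cur ++ [l])

-- recursive characterisation of B's phase 1
def pvCut : List String → List (List String)
  | [] => [[]]
  | l :: ls =>
    if PySem.Str.strip l == "---" then [] :: pvCut ls
    else match pvCut ls with
      | [] => [[l]]
      | g :: gs => (l :: g) :: gs

-- recursive characterisation of B's phase 2 on one group, with initial buffer buf
def pvEmitG : List String → List String → List String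
  | [], buf => pvFlushL buf
  | l :: g, buf =>
    if PySem.Str.startswith l "### " then pvFlushL buf ++ pvEmitG g [l]
    else pvEmitG g (buf ++ [l])

def pvFinA (st : List String × List String) : List String :=
  if st.2 ≠ [] then st.1 ++ [pvFlushPart st.2] else st.1

def pvEmitAll : List (List String) → List String → List String
  | [], _ => []
  | g :: gs, buf => pvEmitG g buf ++ gs.flatMap (fun h => pvEmitG h [])

theorem pvFinA_eq (parts cur : List String) :
    pvFinA (parts, cur) = parts ++ pvFlushL cur := by
  by_cases h : cur = [] <;> simp [pvFinA, pvFlushL, h]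

theorem foldA (ls : List String) : ∀ parts cur,
    pvFinA (ls.foldl pvStepA (parts, cur)) = parts ++ pvEmitA ls cur := by
  induction ls with
  | nil => intro parts cur; simp [pvEmitA, pvFinA_eq]
  | cons l ls ih =>
    intro parts cur
    by_cases hh : PySem.Chars.startswith l.toList ['#', '#', '#', ' '] = true
    · by_cases hc : cur = [] <;>
        simp [pvStepA, hh, hc, pvEmitA, ih, pvFlushL]
    · by_cases hs : PySem.Str.strip l = "---"
      · by_cases hc : cur = [] <;>
          simp [pvStepA, hh, hs, hc, pvEmitA, ih, pvFlushL]
      · simp [pvStepA, hh, hs, pvEmitA, ih]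

theorem foldG (g : List String) : ∀ parts buf,
    pvFinA (g.foldl pvStepEmit (parts, buf)) = parts ++ pvEmitG g buf := by
  induction g with
  | nil => intro parts buf; simp [pvEmitG, pvFinA_eq]
  | cons l g ih =>
    intro parts buf
    by_cases hh : PySem.Chars.startswith l.toList ['#', '#', '#', ' '] = true
    · by_cases hc : buf = [] <;>
        simp [pvStepEmit, hh, hc, pvEmitG, ih, pvFlushL]
    · simp [pvStepEmit, hh, pvEmitG, ih]

theorem pvEmitGroup_eq (parts g : List String) :
    pvEmitGroup parts g = parts ++ pvEmitG g [] := by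
  simpa [pvEmitGroup, pvFinA] using foldG g parts []

theorem pvCut_ne_nil (ls : List String) : pvCut ls ≠ [] := by
  cases ls with
  | nil => simp [pvCut]
  | cons l ls =>
    by_cases hs : PySem.Str.strip l = "---"
    · simp [pvCut, hs]
    · simp only [pvCut, beq_iff_eq, hs, if_false]
      cases pvCut ls <;> simp

theorem foldCut (ls : List String) : ∀ gs cur,
    (let c := ls.foldl pvStepCut (gs, cur); c.1 ++ [c.2]) =
      gs ++ (match pvCut ls with
             | [] => [cur]
             | g :: t => (cur ++ g) :: t) := by
  induction ls with
  | nil => intro gs cur; simp [pvCut]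
  | cons l ls ih =>
    intro gs cur
    by_cases hs : PySem.Str.strip l = "---"
    · have h2 := ih (gs ++ [cur]) []
      simp only [pvStepCut, beq_iff_eq, hs, if_true, List.foldl_cons, pvCut] at h2 ⊢
      rw [h2]
      rcases hg : pvCut ls with _ | ⟨g, t⟩
      · exact absurd hg (pvCut_ne_nil ls)
      · simp
    · have h2 := ih gs (cur ++ [l])
      simp only [pvStepCut, beq_iff_eq, hs, if_false, List.foldl_cons, pvCut] at h2 ⊢
      rw [h2]
      rcases hg : pvCut ls with _ | ⟨g, t⟩
      · exact absurd hg (pvCut_ne_nil ls)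
      · simp

-- a line starting with '### ' never strips to '---'
theorem pvExcl (l : String)
    (hh : PySem.Chars.startswith l.toList ['#', '#', '#', ' '] = true) :
    ¬ PySem.Str.strip l = "---" := by
  intro hs
  have hlist : PySem.Chars.strip l.toList = ['-', '-', '-'] := by
    have := congrArg String.toList hs
    simpa using this
  have hpre : (['#', '#', '#', ' '] : List Char) <+: l.toList :=
    (PySem.Chars.startswith_iff _ _).mp hh
  obtain ⟨t, ht⟩ := hpre
  rw [← ht] at hlist
  have hisp : PySem.Chars.isspace '#' = false := by decide
  simp only [PySem.Chars.strip, PySem.Chars.lstrip, List.cons_append, List.nil_append,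
    List.dropWhile_cons, hisp, Bool.false_eq_true, if_false, PySem.Chars.rstrip] at hlist
  have hrev : List.dropWhile PySem.Chars.isspace
      (('#' :: '#' :: '#' :: ' ' :: t).reverse) = ['-', '-', '-'] := by
    have := congrArg List.reverse hlist
    simpa using this
  have hsuf := List.dropWhile_suffix (l := ('#' :: '#' :: '#' :: ' ' :: t).reverse)
    (p := PySem.Chars.isspace)
  rw [hrev] at hsuf
  obtain ⟨u, hu⟩ := hsuf
  have hlast : (u ++ ['-', '-', '-']).getLast? =
      (('#' :: '#' :: '#' :: ' ' :: t).reverse).getLast? := by rw [hu]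
  simp [List.getLast?_append] at hlast

theorem pvMain (ls : List String) : ∀ buf,
    pvEmitA ls buf = pvEmitAll (pvCut ls) buf := by
  induction ls with
  | nil => intro buf; simp [pvEmitA, pvCut, pvEmitAll, pvEmitG]
  | cons l ls ih =>
    intro buf
    obtain ⟨g, gs, hg⟩ : ∃ g gs, pvCut ls = g :: gs := by
      rcases h : pvCut ls with _ | ⟨g, gs⟩
      · exact absurd h (pvCut_ne_nil ls)
      · exact ⟨g, gs, rfl⟩
    by_cases hh : PySem.Chars.startswith l.toList ['#', '#', '#', ' '] = true
    · have hs := pvExcl l hh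
      simp [pvEmitA, pvCut, hh, hs, hg, pvEmitAll, ih, pvEmitG]
    · by_cases hs : PySem.Str.strip l = "---"
      · simp [pvEmitA, pvCut, hh, hs, hg, pvEmitAll, ih, pvEmitG, pvFlushL]
      · simp [pvEmitA, pvCut, hh, hs, hg, pvEmitAll, ih, pvEmitG]

theorem pvFoldEmitGroups (gs : List (List String)) : ∀ acc,
    gs.foldl pvEmitGroup acc = acc ++ gs.flatMap (fun h => pvEmitG h []) := by
  induction gs with
  | nil => intro acc; simp
  | cons g gs ih => intro acc; simp [pvEmitGroup_eq, ih]

-- ===== VERDICT (by name: the statement is the Claim_ definition above) =====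
theorem split_into_parts_spec : Claim_equal_split_into_parts := by
  intro content _
  unfold Spec_split_into_parts split_into_parts split_into_parts_alt
  set ls := (PySem.Str.split? content "\n").getD [] with hls
  have hA : (if (ls.foldl pvStepA ([], [])).2 ≠ [] then
        (ls.foldl pvStepA ([], [])).1 ++ [pvFlushPart (ls.foldl pvStepA ([], [])).2]
      else (ls.foldl pvStepA ([], [])).1) = pvEmitA ls [] := by
    have := foldA ls [] []
    simpa [pvFinA] using this
  have hB : (((ls.foldl pvStepCut ([], [])).1 ++ [(ls.foldl pvStepCut ([], [])).2]).foldl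
        pvEmitGroup []) = pvEmitAll (pvCut ls) [] := by
    have hc := foldCut ls [] []
    simp only at hc
    rw [hc]
    obtain ⟨g, gs, hg⟩ : ∃ g gs, pvCut ls = g :: gs := by
      rcases h : pvCut ls with _ | ⟨g, gs⟩
      · exact absurd h (pvCut_ne_nil ls)
      · exact ⟨g, gs, rfl⟩
    rw [hg]
    simp [pvFoldEmitGroups, pvEmitAll, pvEmitGroup_eq]
  simp only [hA, hB, pvMain]
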